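-- pv_equiv track=rewrite | github.com/jtfisch/AvaFrame | avaframe/in2Trans/geoTrans.py | findAngleProfile
-- ===== SOURCE A (Python) =====
-- def findAngleProfile(tmp, deltaInd):
--     """
--     Find the beta point: first point under the beta value given in
--     prepareFind10Point. Make sure that the delta_ind next indexes are also
--     under the beta value otherwise keep looking
--      """
--     i = 0
--     while True:
--         ind = tmp[0][i]
--         condition = True
--         for j in range(deltaInd):
--             condition = condition and (tmp[0][i+j+1] == ind+j+1)
--             if not condition:
--                 i = i + j + 1
--                 break
--         if condition:
--             idsAnglePoint = ind - 1
--             break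
--     return idsAnglePoint
-- ===== SOURCE B (Python) =====
-- def findAngleProfile(tmp, deltaInd):
--     """Single forward pass keeping a run counter and the value that started
--     the current run of consecutive indices; return runStart-1 once the run
--     reaches deltaInd steps."""
--     xs = tmp[0]
--     runStart = xs[0]
--     if deltaInd <= 0:
--         return runStart - 1
--     count = 0
--     k = 0
--     while True:
--         nxt = xs[k + 1]
--         if nxt == xs[k] + 1:
--             count += 1
--         else:
--             count = 0
--             runStart = nxt
--         if count >= deltaInd:
--             return runStart - 1
--         k += 1
-- ===== Notes on version B (the rewrite author's own statement) =====
-- stated objective: simpler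
-- what changed: Replaces A's restarting outer/inner double loop (re-test a window of deltaInd consecutive indices from each candidate start, jumping the start on failure) by a single forward pass that maintains a counter of consecutive steps and the value that started the current run, returning once the counter reaches deltaInd.
import Mathlib
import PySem

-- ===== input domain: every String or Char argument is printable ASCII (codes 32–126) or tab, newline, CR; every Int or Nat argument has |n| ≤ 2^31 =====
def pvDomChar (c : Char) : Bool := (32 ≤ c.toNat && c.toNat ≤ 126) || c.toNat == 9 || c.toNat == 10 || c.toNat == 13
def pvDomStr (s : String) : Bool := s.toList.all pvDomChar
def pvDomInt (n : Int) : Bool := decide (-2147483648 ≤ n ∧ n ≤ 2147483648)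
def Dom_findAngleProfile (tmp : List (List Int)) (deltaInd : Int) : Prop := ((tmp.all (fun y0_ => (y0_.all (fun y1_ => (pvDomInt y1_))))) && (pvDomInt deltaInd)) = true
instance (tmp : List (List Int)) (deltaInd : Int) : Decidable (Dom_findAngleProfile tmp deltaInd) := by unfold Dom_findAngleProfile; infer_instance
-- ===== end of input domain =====

-- B replaces A's restarting two-level scan by a single forward pass with a run counter; objective: simpler.

-- ===== PORT A =====
-- inner 'for j in range(deltaInd)' loop of A: 'some none' = loop finished with condition True,
-- 'some (some i')' = condition failed, i set to i+j+1 and break; 'none' = IndexError.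
def pvInnerA (xs : List Int) (i ind : Int) : List Int → Option (Option Int)
  | [] => some none
  | j :: js =>
    match PySem.List.pyGet? xs (i + j + 1) with
    | none => none
    | some v => if v = ind + j + 1 then pvInnerA xs i ind js else some (some (i + j + 1))

-- outer 'while True' loop of A; fuel bounds the iterations (i strictly increases); 'none' = IndexError.
def pvLoopA (xs : List Int) (deltaInd : Int) : Nat → Int → Option Int
  | 0, _ => none
  | fuel + 1, i =>
    match PySem.List.pyGet? xs i with
    | none => none
    | some ind =>
      match pvInnerA xs i ind (PySem.List.pyRange 0 deltaInd 1) with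
      | none => none
      | some none => some (ind - 1)
      | some (some i') => pvLoopA xs deltaInd fuel i'

def findAngleProfile (tmp : List (List Int)) (deltaInd : Int) : Int :=
  match PySem.List.pyGet? tmp 0 with
  | none => 0
  | some xs => (pvLoopA xs deltaInd (xs.length + 1) 0).getD 0

-- ===== PORT B =====
-- B's 'while True' loop: k cursor, runStart value starting the current run, count of consecutive steps.
def pvLoopB (xs : List Int) (deltaInd : Int) : Nat → Int → Int → Int → Option Int
  | 0, _, _, _ => none
  | fuel + 1, k, runStart, count =>
    match PySem.List.pyGet? xs (k + 1) with
    | none => none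
    | some nxt =>
      match PySem.List.pyGet? xs k with
      | none => none
      | some cur =>
        let count' := if nxt = cur + 1 then count + 1 else 0
        let runStart' := if nxt = cur + 1 then runStart else nxt
        if deltaInd ≤ count' then some (runStart' - 1)
        else pvLoopB xs deltaInd fuel (k + 1) runStart' count'

def findAngleProfile_alt (tmp : List (List Int)) (deltaInd : Int) : Int :=
  match PySem.List.pyGet? tmp 0 with
  | none => 0
  | some xs =>
    match PySem.List.pyGet? xs 0 with
    | none => 0
    | some runStart =>
      if deltaInd ≤ 0 then runStart - 1
      else (pvLoopB xs deltaInd xs.length 0 runStart 0).getD 0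

-- ===== PRECONDITION & SPEC =====
-- Pre_ = exactly the inputs where A returns: tmp and tmp[0] nonempty, and (unless deltaInd ≤ 0)
-- some start index carries deltaInd consecutive successors inside the list; otherwise A raises IndexError.
def Pre_findAngleProfile (tmp : List (List Int)) (deltaInd : Int) : Prop :=
  tmp ≠ [] ∧ (tmp.headD []) ≠ [] ∧
    (deltaInd ≤ 0 ∨
      ∃ i : Nat, i + deltaInd.toNat < (tmp.headD []).length ∧
        ∀ k : Nat, k < deltaInd.toNat →
          (tmp.headD []).getD (i + k + 1) 0 = (tmp.headD []).getD i 0 + (k + 1))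
instance (tmp : List (List Int)) (deltaInd : Int) : Decidable (Pre_findAngleProfile tmp deltaInd) := by
  unfold Pre_findAngleProfile
  have hdec : ∀ (xs : List Int) (d : Nat),
      Decidable (∃ i : Nat, i + d < xs.length ∧
        ∀ k : Nat, k < d → xs.getD (i + k + 1) 0 = xs.getD i 0 + (k + 1)) := by
    intro xs d
    refine decidable_of_iff (∃ i < xs.length, i + d < xs.length ∧
        ∀ k : Nat, k < d → xs.getD (i + k + 1) 0 = xs.getD i 0 + (k + 1)) ?_
    constructor
    · rintro ⟨i, _, h⟩; exact ⟨i, h⟩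
    · rintro ⟨i, h1, h2⟩; exact ⟨i, by omega, h1, h2⟩
  exact instDecidableAnd

def pvWitness_findAngleProfile : List (List Int) × Int := ([[3, 4, 5, 6]], 2)

def Spec_findAngleProfile (tmp : List (List Int)) (deltaInd : Int) (out : Int) : Prop := out = findAngleProfile_alt tmp deltaInd
instance (tmp : List (List Int)) (deltaInd : Int) (out : Int) : Decidable (Spec_findAngleProfile tmp deltaInd out) := by unfold Spec_findAngleProfile; infer_instance

-- ===== CLAIM (what is proved, stated in full; the proofs are below) =====
def Claim_equal_findAngleProfile : Prop := ∀ (tmp : List (List Int)) (deltaInd : Int), Dom_findAngleProfile tmp deltaInd → Pre_findAngleProfile tmp deltaInd → Spec_findAngleProfile tmp deltaInd (findAngleProfile tmp deltaInd)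

-- ===== LEMMAS AND PROOFS =====

-- index i carries a run: the next d entries are consecutive successors of xs[i]
def GoodAt (xs : List Int) (d : Nat) (i : Nat) : Prop :=
  i + d < xs.length ∧ ∀ k : Nat, k < d → xs.getD (i + k + 1) 0 = xs.getD i 0 + (k + 1)

lemma pyGet?_nat (xs : List Int) (n : Nat) (h : n < xs.length) :
    PySem.List.pyGet? xs (n : Int) = some (xs.getD n 0) := by
  rw [PySem.List.pyGet?_natCast, List.getElem?_eq_getElem h]
  simp [List.getD, List.getElem?_eq_getElem h]

lemma innerA_cons (xs : List Int) (i ind j v : Int) (js : List Int)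
    (h : PySem.List.pyGet? xs (i + j + 1) = some v) :
    pvInnerA xs i ind (j :: js) =
      if v = ind + j + 1 then pvInnerA xs i ind js else some (some (i + j + 1)) := by
  rw [pvInnerA, h]

lemma loopA_unfold (xs : List Int) (deltaInd : Int) (fuel : Nat) (i ind : Int)
    (h : PySem.List.pyGet? xs i = some ind) :
    pvLoopA xs deltaInd (fuel + 1) i =
      (match pvInnerA xs i ind (PySem.List.pyRange 0 deltaInd 1) with
       | none => none
       | some none => some (ind - 1)
       | some (some i') => pvLoopA xs deltaInd fuel i') := by
  rw [pvLoopA, h]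

lemma loopB_unfold (xs : List Int) (deltaInd : Int) (fuel : Nat) (k runStart count nxt cur : Int)
    (h1 : PySem.List.pyGet? xs (k + 1) = some nxt)
    (h2 : PySem.List.pyGet? xs k = some cur) :
    pvLoopB xs deltaInd (fuel + 1) k runStart count =
      (if deltaInd ≤ (if nxt = cur + 1 then count + 1 else 0) then
        some ((if nxt = cur + 1 then runStart else nxt) - 1)
       else pvLoopB xs deltaInd fuel (k + 1) (if nxt = cur + 1 then runStart else nxt)
              (if nxt = cur + 1 then count + 1 else 0)) := by
  rw [pvLoopB, h1, h2]

lemma innerA_ok (xs : List Int) (deltaInd : Int) (i : Nat)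
    (hgood : ∀ k : Nat, (k : Int) < deltaInd →
      i + k + 1 < xs.length ∧ xs.getD (i + k + 1) 0 = xs.getD i 0 + (k + 1)) :
    ∀ (m j : Nat), deltaInd ≤ (j : Int) + m →
      pvInnerA xs (i : Int) (xs.getD i 0) (PySem.List.pyRange (j : Int) deltaInd 1) = some none := by
  intro m
  induction m with
  | zero =>
    intro j hj
    rw [PySem.List.pyRange_one_eq_nil (by omega)]
    rfl
  | succ m ih =>
    intro j hj
    by_cases hle : deltaInd ≤ (j : Int)
    · rw [PySem.List.pyRange_one_eq_nil hle]; rfl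
    · rw [PySem.List.pyRange_one_cons (by omega)]
      obtain ⟨hr, hv⟩ := hgood j (by omega)
      have hcast : (i : Int) + (j : Int) + 1 = ((i + j + 1 : Nat) : Int) := by push_cast; ring
      rw [innerA_cons xs (i : Int) (xs.getD i 0) (j : Int) (xs.getD (i + j + 1) 0) _
        (by rw [hcast]; exact pyGet?_nat xs (i + j + 1) hr)]
      have hvv : xs.getD (i + j + 1) 0 = xs.getD i 0 + (j : Int) + 1 := by
        rw [hv]; ring
      rw [if_pos hvv]
      have hjc : (j : Int) + 1 = ((j + 1 : Nat) : Int) := by push_cast; ring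
      rw [hjc]
      exact ih (j + 1) (by push_cast; push_cast at hj; omega)

lemma innerA_fail (xs : List Int) (deltaInd : Int) (i : Nat) (f : Nat)
    (hfd : (f : Int) < deltaInd)
    (hrange : i + f + 1 < xs.length)
    (hfail : xs.getD (i + f + 1) 0 ≠ xs.getD i 0 + (f + 1)) :
    ∀ (m j : Nat), j + m = f →
      (∀ k : Nat, j ≤ k → k < f → xs.getD (i + k + 1) 0 = xs.getD i 0 + (k + 1)) →
      pvInnerA xs (i : Int) (xs.getD i 0) (PySem.List.pyRange (j : Int) deltaInd 1) =
        some (some (((i + f + 1 : Nat) : Int))) := by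
  intro m
  induction m with
  | zero =>
    intro j hj hpass
    have hjf : j = f := by omega
    subst hjf
    rw [PySem.List.pyRange_one_cons (by omega)]
    have hcast : (i : Int) + (j : Int) + 1 = ((i + j + 1 : Nat) : Int) := by push_cast; ring
    rw [innerA_cons xs (i : Int) (xs.getD i 0) (j : Int) (xs.getD (i + j + 1) 0) _
      (by rw [hcast]; exact pyGet?_nat xs (i + j + 1) hrange)]
    have hne : ¬ (xs.getD (i + j + 1) 0 = xs.getD i 0 + (j : Int) + 1) := by
      intro h; apply hfail; rw [h]; ring
    rw [if_neg hne, hcast]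
  | succ m ih =>
    intro j hj hpass
    have hjlt : j < f := by omega
    rw [PySem.List.pyRange_one_cons (by omega)]
    have hcast : (i : Int) + (j : Int) + 1 = ((i + j + 1 : Nat) : Int) := by push_cast; ring
    have hr : i + j + 1 < xs.length := by omega
    rw [innerA_cons xs (i : Int) (xs.getD i 0) (j : Int) (xs.getD (i + j + 1) 0) _
      (by rw [hcast]; exact pyGet?_nat xs (i + j + 1) hr)]
    have hvv : xs.getD (i + j + 1) 0 = xs.getD i 0 + (j : Int) + 1 := by
      rw [hpass j le_rfl hjlt]; ring
    rw [if_pos hvv]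
    have hjc : (j : Int) + 1 = ((j + 1 : Nat) : Int) := by push_cast; ring
    rw [hjc]
    exact ih (j + 1) (by omega) (fun k hk1 hk2 => hpass k (by omega) hk2)

lemma chainStep (xs : List Int) (s : Nat) :
    ∀ j : Nat, (∀ m : Nat, s ≤ m → m < s + j → xs.getD (m + 1) 0 = xs.getD m 0 + 1) →
      xs.getD (s + j) 0 = xs.getD s 0 + j := by
  intro j
  induction j with
  | zero => intro _; simp
  | succ j ih =>
    intro h
    have h1 : xs.getD (s + j + 1) 0 = xs.getD (s + j) 0 + 1 :=
      h (s + j) (by omega) (by omega)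
    have h2 := ih (fun m hm1 hm2 => h m hm1 (by omega))
    have hsj : s + (j + 1) = s + j + 1 := by omega
    rw [hsj, h1, h2]; push_cast; ring

lemma loopA_eq (xs : List Int) (deltaInd : Int) (d : Nat) (hd1 : 1 ≤ d)
    (hdd : deltaInd = (d : Int)) (i0 : Nat)
    (hgood : GoodAt xs d i0) (hmin : ∀ p : Nat, p < i0 → ¬ GoodAt xs d p) :
    ∀ (fuel i : Nat), i ≤ i0 → i0 + 1 ≤ i + fuel →
      pvLoopA xs deltaInd fuel (i : Int) = some (xs.getD i0 0 - 1) := by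
  intro fuel
  induction fuel with
  | zero => intro i h1 h2; omega
  | succ fuel ih =>
    intro i h1 h2
    obtain ⟨hlen0, hvals0⟩ := hgood
    have hilen : i < xs.length := by omega
    rw [loopA_unfold xs deltaInd fuel (i : Int) (xs.getD i 0) (pyGet?_nat xs i hilen)]
    by_cases hi : i = i0
    · subst hi
      have hok : pvInnerA xs (i : Int) (xs.getD i 0) (PySem.List.pyRange ((0 : Nat) : Int) deltaInd 1) = some none := by
        apply innerA_ok xs deltaInd i
        · intro k hk
          have hkd : k < d := by omega
          exact ⟨by omega, hvals0 k hkd⟩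
        · show deltaInd ≤ ((0 : Nat) : Int) + (d : Nat)
          omega
      rw [show ((0 : Nat) : Int) = (0 : Int) from rfl] at hok
      rw [hok]
    · have hilt : i < i0 := by omega
      have hnogood : ¬ GoodAt xs d i := hmin i hilt
      have hbad : ∃ k : Nat, k < d ∧ xs.getD (i + k + 1) 0 ≠ xs.getD i 0 + (k + 1) := by
        by_contra hcon
        apply hnogood
        refine ⟨by omega, ?_⟩
        intro k hk
        by_contra hne
        exact hcon ⟨k, hk, hne⟩
      classical
      have hP : ∃ k, k < d ∧ xs.getD (i + k + 1) 0 ≠ xs.getD i 0 + (k + 1) := hbad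
      set f := Nat.find hP with hfdef
      obtain ⟨hfd', hffail⟩ : f < d ∧ xs.getD (i + f + 1) 0 ≠ xs.getD i 0 + (f + 1) :=
        Nat.find_spec hP
      have hfmin := fun k (hk : k < f) => Nat.find_min hP hk
      have hpass : ∀ k : Nat, 0 ≤ k → k < f → xs.getD (i + k + 1) 0 = xs.getD i 0 + (k + 1) := by
        intro k _ hk
        by_contra hne
        exact hfmin k hk ⟨by omega, hne⟩
      have hfr : i + f + 1 < xs.length := by omega
      have hfailA := innerA_fail xs deltaInd i f (by omega) hfr hffail f 0 (by omega)
        (fun k hk1 hk2 => hpass k hk1 hk2)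
      rw [show ((0 : Nat) : Int) = (0 : Int) from rfl] at hfailA
      rw [hfailA]
      have hnext : i + f + 1 ≤ i0 := by
        by_contra hcon
        have hle : i0 ≤ i + f := by omega
        set m := i0 - i with hm
        have hm1 : 1 ≤ m := by omega
        have hmf : m ≤ f := by omega
        have e1 : xs.getD (i + (m - 1) + 1) 0 = xs.getD i 0 + ((m - 1 : Nat) + 1) :=
          hpass (m - 1) (by omega) (by omega)
        have hidx1 : i + (m - 1) + 1 = i0 := by omega
        rw [hidx1] at e1
        have e2 : xs.getD (i0 + (f - m) + 1) 0 = xs.getD i0 0 + ((f - m : Nat) + 1) :=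
          hvals0 (f - m) (by omega)
        have hidx2 : i0 + (f - m) + 1 = i + f + 1 := by omega
        rw [hidx2] at e2
        apply hffail
        rw [e2, e1]
        have c1 : ((m - 1 : Nat) : Int) = (m : Int) - 1 := by omega
        have c2 : ((f - m : Nat) : Int) = (f : Int) - m := by omega
        rw [c1, c2]
        ring
      exact ih (i + f + 1) hnext (by omega)

lemma loopB_eq (xs : List Int) (deltaInd : Int) (d : Nat) (hd1 : 1 ≤ d)
    (hdd : deltaInd = (d : Int)) (i0 : Nat)
    (hgood : GoodAt xs d i0) (hmin : ∀ p : Nat, p < i0 → ¬ GoodAt xs d p) :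
    ∀ (fuel k count : Nat), count ≤ k →
      (∀ m : Nat, k - count ≤ m → m < k → xs.getD (m + 1) 0 = xs.getD m 0 + 1) →
      count < d → k - count ≤ i0 → i0 + d ≤ k + fuel →
      pvLoopB xs deltaInd fuel (k : Int) (xs.getD (k - count) 0) (count : Int) =
        some (xs.getD i0 0 - 1) := by
  intro fuel
  induction fuel with
  | zero => intro k count h1 _ h3 h4 h5; omega
  | succ fuel ih =>
    intro k count hck hrun hcnt hs hfuel
    obtain ⟨hlen0, hvals0⟩ := hgood
    have hklt : k < i0 + d := by omega
    have hk1len : k + 1 < xs.length := by omega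
    have hcast1 : (k : Int) + 1 = ((k + 1 : Nat) : Int) := by push_cast; ring
    rw [loopB_unfold xs deltaInd fuel (k : Int) (xs.getD (k - count) 0) (count : Int)
      (xs.getD (k + 1) 0) (xs.getD k 0)
      (by rw [hcast1]; exact pyGet?_nat xs (k + 1) hk1len)
      (pyGet?_nat xs k (by omega))]
    by_cases hstep : xs.getD (k + 1) 0 = xs.getD k 0 + 1
    · simp only [if_pos hstep]
      by_cases hreach : d ≤ count + 1
      · have hcd : count + 1 = d := by omega
        have hcond : deltaInd ≤ (count : Int) + 1 := by omega
        rw [if_pos hcond]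
        set s := k - count with hsdef
        have hrun' : ∀ m : Nat, s ≤ m → m < k + 1 → xs.getD (m + 1) 0 = xs.getD m 0 + 1 := by
          intro m hm1 hm2
          rcases Nat.lt_or_ge m k with h | h
          · exact hrun m hm1 h
          · have hmk : m = k := by omega
            rw [hmk]; exact hstep
        have hsgood : GoodAt xs d s := by
          constructor
          · omega
          · intro j hj
            have hchain := chainStep xs s (j + 1)
              (fun m hm1 hm2 => hrun' m hm1 (by omega))
            have hidx : s + (j + 1) = s + j + 1 := by omega
            rw [hidx] at hchain
            rw [hchain]; push_cast; ring
        have hsi0 : s = i0 := by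
          by_contra hne
          exact hmin s (by omega) hsgood
        rw [hsi0]
      · have hcond : ¬ (deltaInd ≤ (count : Int) + 1) := by omega
        rw [if_neg hcond]
        have hcast2 : (count : Int) + 1 = ((count + 1 : Nat) : Int) := by push_cast; ring
        have hcast3 : (k : Nat) - count = (k + 1) - (count + 1) := by omega
        rw [hcast1, hcast2, hcast3]
        apply ih (k + 1) (count + 1) (by omega) ?_ (by omega) (by omega) (by omega)
        intro m hm1 hm2
        rcases Nat.lt_or_ge m k with h | h
        · exact hrun m (by omega) h
        · have hmk : m = k := by omega
          rw [hmk]; exact hstep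
    · simp only [if_neg hstep]
      have hcond : ¬ (deltaInd ≤ (0 : Int)) := by omega
      rw [if_neg hcond]
      have hnext : k + 1 ≤ i0 := by
        by_contra hcon
        have hik : i0 ≤ k := by omega
        set j := k - i0 with hj
        have hjd : j < d := by omega
        have e1 : xs.getD (i0 + j + 1) 0 = xs.getD i0 0 + ((j : Nat) + 1) := hvals0 j hjd
        have hidx1 : i0 + j + 1 = k + 1 := by omega
        rw [hidx1] at e1
        apply hstep
        rcases Nat.eq_zero_or_pos j with hj0 | hjpos
        · have hki : k = i0 := by omega
          rw [e1, hki]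
          rw [hj0]
          push_cast
          ring
        · have e2 : xs.getD (i0 + (j - 1) + 1) 0 = xs.getD i0 0 + ((j - 1 : Nat) + 1) :=
            hvals0 (j - 1) (by omega)
          have hidx2 : i0 + (j - 1) + 1 = k := by omega
          rw [hidx2] at e2
          rw [e1, e2]
          have c1 : ((j - 1 : Nat) : Int) = (j : Int) - 1 := by omega
          rw [c1]; ring
      have hrec := ih (k + 1) 0 (by omega) (by intro m hm1 hm2; omega) (by omega)
        (by omega) (by omega)
      rw [hcast1]
      exact hrec

-- ===== VERDICT (by name: the statement is the Claim_ definition above) =====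
theorem findAngleProfile_spec : Claim_equal_findAngleProfile := by
  intro tmp deltaInd _ hpre
  obtain ⟨hne, hne0, hcase⟩ := hpre
  obtain ⟨xs, rest, rfl⟩ : ∃ xs rest, tmp = xs :: rest := by
    cases tmp with
    | nil => exact absurd rfl hne
    | cons a t => exact ⟨a, t, rfl⟩
  have hhead : (List.headD ((xs :: rest) : List (List Int)) ([] : List Int)) = xs := rfl
  rw [hhead] at hne0 hcase
  have hxs0 : 0 < xs.length := List.length_pos_of_ne_nil hne0
  unfold Spec_findAngleProfile findAngleProfile findAngleProfile_alt
  rw [PySem.List.pyGet?_zero_cons]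
  simp only []
  have hget0 : PySem.List.pyGet? xs 0 = some (xs.getD 0 0) := by
    have := pyGet?_nat xs 0 hxs0
    simpa using this
  rw [hget0]
  simp only []
  by_cases hdle : deltaInd ≤ 0
  · rw [if_pos hdle]
    have h1 : pvLoopA xs deltaInd (xs.length + 1) 0 = some (xs.getD 0 0 - 1) := by
      rw [loopA_unfold xs deltaInd xs.length 0 (xs.getD 0 0) hget0,
        PySem.List.pyRange_one_eq_nil hdle]
      rfl
    rw [h1]
    rfl
  · rw [if_neg hdle]
    have hex : ∃ i : Nat, i + deltaInd.toNat < xs.length ∧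
        ∀ k : Nat, k < deltaInd.toNat → xs.getD (i + k + 1) 0 = xs.getD i 0 + (k + 1) := by
      rcases hcase with h | h
      · exact absurd h hdle
      · exact h
    set d := deltaInd.toNat with hddef
    have hdd : deltaInd = (d : Int) := by omega
    have hd1 : 1 ≤ d := by omega
    classical
    have hexG : ∃ i : Nat, GoodAt xs d i := by
      obtain ⟨i, h1, h2⟩ := hex
      exact ⟨i, h1, h2⟩
    let i0 := Nat.find hexG
    have hgood : GoodAt xs d i0 := Nat.find_spec hexG
    have hmin : ∀ p : Nat, p < i0 → ¬ GoodAt xs d p := fun p hp => Nat.find_min hexG hp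
    have hA : pvLoopA xs deltaInd (xs.length + 1) 0 = some (xs.getD i0 0 - 1) := by
      have := loopA_eq xs deltaInd d hd1 hdd i0 hgood hmin (xs.length + 1) 0 (by omega)
        (by obtain ⟨h1, _⟩ := hgood; omega)
      simpa using this
    have hB : pvLoopB xs deltaInd xs.length 0 (xs.getD 0 0) 0 = some (xs.getD i0 0 - 1) := by
      have := loopB_eq xs deltaInd d hd1 hdd i0 hgood hmin xs.length 0 0 (by omega)
        (by intro m h1 h2; omega) (by omega) (by omega)
        (by obtain ⟨h1, _⟩ := hgood; omega)
      simpa using this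
    rw [hA, hB]
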